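-- pv_equiv track=rewrite | github.com/MomsDeveloper/FP | lab1/src/collatz.py | euler_14
-- ===== SOURCE A (Python) =====
-- def gen_len(n: int) -> int:
--     if n == 1:
--         return 1
--     if n % 2 == 0:
--         return 1 + gen_len(n // 2)
--     return 1 + gen_len(3 * n + 1)
--
-- def euler_14(n: int) -> int:
--     if n == 1:
--         return 1
--     max_len = 0
--     max_num = 0
--     for i in range(1, n):
--         length = gen_len(i)
--         if length > max_len:
--             max_len = length
--             max_num = i
--     return max_num
-- ===== SOURCE B (Python) =====
-- def euler_14(n: int) -> int:
--     if n == 1: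
--         return 1
--
--     def clen(i: int) -> int:
--         c = 1
--         while i != 1:
--             i = (i >> 1) if (i & 1) == 0 else 3 * i + 1
--             c += 1
--         return c
--
--     return max(range(1, n), key=clen, default=0)
-- ===== Notes on version B (the rewrite author's own statement) =====
-- stated objective: alternative
-- what changed: Chain lengths are computed by an iterative while-loop with shift/mask arithmetic instead of A's per-step recursion with // and %, and the best index is selected by the builtin max(..., key=..., default=0) instead of A's hand-rolled accumulator loop.
import Mathlib
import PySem

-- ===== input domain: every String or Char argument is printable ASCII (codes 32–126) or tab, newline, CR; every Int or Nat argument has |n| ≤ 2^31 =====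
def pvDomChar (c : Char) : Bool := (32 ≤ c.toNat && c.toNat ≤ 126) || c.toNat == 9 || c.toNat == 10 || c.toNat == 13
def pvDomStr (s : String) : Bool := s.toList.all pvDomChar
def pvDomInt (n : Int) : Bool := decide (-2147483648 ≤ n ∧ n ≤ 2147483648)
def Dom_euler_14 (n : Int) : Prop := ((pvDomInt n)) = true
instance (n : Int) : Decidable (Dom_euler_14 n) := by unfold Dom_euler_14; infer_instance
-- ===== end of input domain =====

-- B computes Collatz chain lengths iteratively with shift/mask instead of A's per-step
-- recursion with // and %, and picks the best index with max(key=..., default=0) instead of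
-- A's accumulator loop; equivalence of the return value is proved for every Int input.
-- Both ports totalize the (conjecturally always terminating) Collatz walk with the same
-- fuel constant; the equivalence theorem holds for every fuel value alike.

def pvFuel : Nat := 100000

-- ===== PORT A =====
-- gen_len: A's recursive chain length (fuel makes the open-ended recursion structural;
-- on fuel exhaustion it returns 1, the value an immediately-terminating chain would have)
def gen_len : Nat → Int → Int
  | 0, _ => 1
  | fuel + 1, n =>
    if n = 1 then 1
    else if PySem.Int.mod n 2 = 0 then 1 + gen_len fuel (PySem.Int.floordiv n 2)
    else 1 + gen_len fuel (3 * n + 1)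

def euler_14 (n : Int) : Int :=
  if n = 1 then 1
  else
    ((PySem.List.pyRange 1 n 1).foldl
      (fun (st : Int × Int) i =>
        let length := gen_len pvFuel i
        if length > st.1 then (length, i) else st)
      (0, 0)).2

-- ===== PORT B =====
-- clenLoop: B's while-loop, counter c; same fuel totalization (returns c when fuel runs out)
def clenLoop : Nat → Int → Int → Int
  | 0, _, c => c
  | fuel + 1, i, c =>
    if i = 1 then c
    else clenLoop fuel (if PySem.Int.band i 1 = 0 then i >>> (1:Nat) else 3 * i + 1) (c + 1)

def clen (i : Int) : Int := clenLoop pvFuel i 1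

def euler_14_alt (n : Int) : Int :=
  if n = 1 then 1
  else PySem.List.maxD (PySem.List.pyRange 1 n 1) clen 0

-- ===== PRECONDITION & SPEC =====
def Spec_euler_14 (n : Int) (out : Int) : Prop := out = euler_14_alt n
instance (n : Int) (out : Int) : Decidable (Spec_euler_14 n out) := by unfold Spec_euler_14; infer_instance

-- ===== CLAIM (what is proved, stated in full; the proofs are below) =====
def Claim_equal_euler_14 : Prop := ∀ (n : Int), Dom_euler_14 n → Spec_euler_14 n (euler_14 n)

-- ===== LEMMAS AND PROOFS =====

-- Python's i >> 1 is floor division by 2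
lemma shiftRight_one_eq_floordiv (i : Int) : i >>> (1:Nat) = PySem.Int.floordiv i 2 := by
  rw [PySem.Int.floordiv_eq_ediv_of_pos (by norm_num)]
  have := Int.shiftRight_eq_div_pow i 1
  simpa using this

-- lockstep: B's counting loop equals c - 1 plus A's recursive length, for EVERY fuel
lemma clenLoop_eq_gen_len : ∀ (fuel : Nat) (i c : Int),
    clenLoop fuel i c = c - 1 + gen_len fuel i := by
  intro fuel
  induction fuel with
  | zero => intro i c; simp [clenLoop, gen_len]
  | succ f ih =>
    intro i c
    by_cases h1 : i = 1
    · simp [clenLoop, gen_len, h1]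
    · rw [clenLoop, gen_len, if_neg h1, if_neg h1]
      rw [PySem.Int.band_one, shiftRight_one_eq_floordiv]
      by_cases he : PySem.Int.mod i 2 = 0
      · rw [if_pos he, if_pos he, ih]; ring
      · rw [if_neg he, if_neg he, ih]; ring

lemma clen_eq (i : Int) : clen i = gen_len pvFuel i := by
  rw [clen, clenLoop_eq_gen_len]; ring

lemma gen_len_pos : ∀ (fuel : Nat) (i : Int), 0 < gen_len fuel i := by
  intro fuel
  induction fuel with
  | zero => intro i; simp [gen_len]
  | succ f ih =>
    intro i
    rw [gen_len]
    split_ifs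
    · norm_num
    · have := ih (PySem.Int.floordiv i 2); omega
    · have := ih (3 * i + 1); omega

-- A's pair-accumulator fold, once seeded with (gen_len m, m), tracks the first-argmax fold
lemma foldPair : ∀ (l : List Int) (m : Int),
    l.foldl
      (fun (st : Int × Int) i =>
        let length := gen_len pvFuel i
        if length > st.1 then (length, i) else st)
      (gen_len pvFuel m, m)
    = (gen_len pvFuel (l.foldl (fun b x => if gen_len pvFuel b < gen_len pvFuel x then x else b) m),
       l.foldl (fun b x => if gen_len pvFuel b < gen_len pvFuel x then x else b) m) := by
  intro l
  induction l with
  | nil => intro m; simp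
  | cons x t ih =>
    intro m
    simp only [List.foldl_cons, gt_iff_lt]
    by_cases h : gen_len pvFuel m < gen_len pvFuel x
    · rw [if_pos h, if_pos h]; exact ih x
    · rw [if_neg h, if_neg h]; exact ih m

-- max? on a nonempty list is the first-argmax fold seeded with the head
lemma max?_cons : ∀ (t : List Int) (key : Int → Int) (x : Int),
    PySem.List.max? (x :: t) key
    = some (t.foldl (fun b y => if key b < key y then y else b) x) := by
  intro t key
  induction t with
  | nil => intro x; rfl
  | cons y t ih =>
    intro x
    have h1 : PySem.List.max? (x :: y :: t) key
        = PySem.List.max? ((if key x < key y then y else x) :: t) key := by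
      by_cases h : key x < key y <;> simp [PySem.List.max?, h]
    rw [h1, ih]
    by_cases h : key x < key y <;> simp [h]

-- ===== VERDICT (by name: the statement is the Claim_ definition above) =====
theorem euler_14_spec : Claim_equal_euler_14 := by
  intro n _
  unfold Spec_euler_14 euler_14 euler_14_alt
  by_cases h1 : n = 1
  · simp [h1]
  · rw [if_neg h1, if_neg h1]
    have hkey : clen = fun i => gen_len pvFuel i := funext clen_eq
    rw [hkey]
    cases hl : PySem.List.pyRange 1 n 1 with
    | nil => simp [PySem.List.maxD, PySem.List.max?]
    | cons i1 rest =>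
      have hpos := gen_len_pos pvFuel i1
      simp only [PySem.List.maxD, List.foldl_cons, gt_iff_lt]
      rw [max?_cons, if_pos hpos, foldPair]
      simp
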